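-- pv_equiv track=rewrite | github.com/rachelPark1/python-files | Python/Python_Q4/Lab_Balance_inclass2.py | weightObjects
-- ===== SOURCE A (Python) =====
-- def weightObjects(items):
--     # takes in a bunch of objects
--     # and returns the total weight of the objects
--     # items : string comprised of '!' and '?'
--     itemsTotal = 0
--     for char in items:
--         if char == "!":
--             itemsTotal = itemsTotal + 2
--         elif char == "?":
--             itemsTotal = itemsTotal + 3
--     return itemsTotal
-- ===== SOURCE B (Python) =====
-- WEIGHTS = {'!': 2, '?': 3}
--
-- def weightObjects(items):
--     # Divide-and-conquer: split the string in half, weigh each half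
--     # recursively, and add; a single character is looked up in a table.
--     n = len(items)
--     if n == 0:
--         return 0
--     if n == 1:
--         return WEIGHTS.get(items, 0)
--     m = n // 2
--     return weightObjects(items[:m]) + weightObjects(items[m:])
-- ===== Notes on version B (the rewrite author's own statement) =====
-- stated objective: alternative
-- what changed: Replaces the single-pass running-total loop with a divide-and-conquer recursion that splits the string in half, weighs each half recursively, and adds the results, with a table lookup at single characters.
import Mathlib
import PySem

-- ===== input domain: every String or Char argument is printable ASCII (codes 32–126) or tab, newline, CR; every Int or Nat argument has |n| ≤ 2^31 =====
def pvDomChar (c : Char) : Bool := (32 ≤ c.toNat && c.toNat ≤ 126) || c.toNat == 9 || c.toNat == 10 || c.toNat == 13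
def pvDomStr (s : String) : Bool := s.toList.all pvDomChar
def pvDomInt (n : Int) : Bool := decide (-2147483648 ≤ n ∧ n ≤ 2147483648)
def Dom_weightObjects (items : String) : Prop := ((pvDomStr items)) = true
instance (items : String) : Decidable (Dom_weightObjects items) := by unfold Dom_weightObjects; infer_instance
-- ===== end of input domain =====

-- B is a structurally different implementation (divide and conquer vs a single accumulator pass); same values, no mutation.

-- ===== PORT A =====
def weightObjects (items : String) : Int :=
  items.toList.foldl (fun itemsTotal char =>
    if char = '!' then itemsTotal + 2
    else if char = '?' then itemsTotal + 3
    else itemsTotal) 0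

-- ===== PORT B =====
-- B: divide and conquer — split in half, weigh each half recursively, add;
-- single characters are looked up in the WEIGHTS table.
def pvWeightsTable : PySem.Dict Char Int :=
  (PySem.Dict.empty.insert '!' 2).insert '?' 3

def weightObjectsAux (l : List Char) : Int :=
  match l with
  | [] => 0
  | [c] => pvWeightsTable.getD c 0
  | a :: b :: rest =>
    let m := (a :: b :: rest).length / 2
    weightObjectsAux ((a :: b :: rest).take m) + weightObjectsAux ((a :: b :: rest).drop m)
termination_by l.length
decreasing_by
  · simp only [List.length_take, List.length_cons]; omega
  · simp only [List.length_drop, List.length_cons]; omega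

def weightObjects_alt (items : String) : Int :=
  weightObjectsAux items.toList

-- ===== PRECONDITION & SPEC =====
def Spec_weightObjects (items : String) (out : Int) : Prop := out = weightObjects_alt items
instance (items : String) (out : Int) : Decidable (Spec_weightObjects items out) := by unfold Spec_weightObjects; infer_instance

-- ===== CLAIM =====
def Claim_equal_weightObjects : Prop := ∀ (items : String), Dom_weightObjects items → Spec_weightObjects items (weightObjects items)

-- ===== LEMMAS AND PROOFS =====
theorem weightObjects_foldl (l : List Char) (t : Int) :
    l.foldl (fun itemsTotal char =>
      if char = '!' then itemsTotal + 2
      else if char = '?' then itemsTotal + 3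
      else itemsTotal) t = t + 2 * l.count '!' + 3 * l.count '?' := by
  induction l generalizing t with
  | nil => simp
  | cons c cs ih =>
    simp only [List.foldl_cons, ih, List.count_cons]
    by_cases h1 : c = '!' <;> by_cases h2 : c = '?' <;>
      simp [h1, h2] <;> ring

theorem weightObjectsAux_count (l : List Char) :
    weightObjectsAux l = 2 * l.count '!' + 3 * l.count '?' := by
  induction l using weightObjectsAux.induct with
  | case1 => simp [weightObjectsAux]
  | case2 c =>
    rcases eq_or_ne c '!' with h1 | h1
    · subst h1
      simp [weightObjectsAux, pvWeightsTable, PySem.Dict.getD, PySem.Dict.get?,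
        PySem.Dict.insert, PySem.Dict.empty, List.find?]
    rcases eq_or_ne c '?' with h2 | h2
    · subst h2
      simp [weightObjectsAux, pvWeightsTable, PySem.Dict.getD, PySem.Dict.get?,
        PySem.Dict.insert, PySem.Dict.empty, List.find?]
    have b1 : ('!' == c) = false := beq_eq_false_iff_ne.mpr (Ne.symm h1)
    have b2 : ('?' == c) = false := beq_eq_false_iff_ne.mpr (Ne.symm h2)
    have c1 : (c == '!') = false := beq_eq_false_iff_ne.mpr h1
    have c2 : (c == '?') = false := beq_eq_false_iff_ne.mpr h2
    simp [weightObjectsAux, pvWeightsTable, PySem.Dict.getD, PySem.Dict.get?,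
      PySem.Dict.insert, PySem.Dict.empty, List.find?, List.count_cons, b1, b2, c1, c2]
  | case3 a b rest m ih1 ih2 =>
    rw [weightObjectsAux]
    rw [ih1, ih2]
    have h := List.take_append_drop ((a :: b :: rest).length / 2) (a :: b :: rest)
    have hc : ∀ x : Char, (a :: b :: rest).count x =
        ((a :: b :: rest).take ((a :: b :: rest).length / 2)).count x
        + ((a :: b :: rest).drop ((a :: b :: rest).length / 2)).count x := by
      intro x
      conv_lhs => rw [← h]
      rw [List.count_append]
    rw [hc '!', hc '?']
    push_cast
    ring

-- ===== VERDICT =====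
theorem weightObjects_spec : Claim_equal_weightObjects := by
  intro items _
  unfold Spec_weightObjects weightObjects weightObjects_alt
  rw [weightObjects_foldl, weightObjectsAux_count]
  ring
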